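-- pv_equiv track=rewrite | github.com/gbaskets/AVPL | vendor_app/utils.py | generate_code
-- ===== SOURCE A (Python) =====
-- def generate_code(id,arry=[]):
--
--     code=""
--     for a in arry:
--         name=""
--         v = True
--         for i in range(len(a)):
--             if (a[i] == ' '):
--                 v = True
--             elif (a[i] != ' ' and v == True):
--                 name += (a[i])
--                 v = False
--         code+=name
--
--     return code + str(id)
-- ===== SOURCE B (Python) =====
-- def generate_code(id, arry=[]):
--     # Simpler: tokenize each string on ' ' and take each non-empty token's first char.
--     return ''.join(w[0] for a in arry for w in a.split(' ') if w) + str(id)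
-- ===== Notes on version B (the rewrite author's own statement) =====
-- stated objective: simpler
-- what changed: Replaces the per-character boolean word-start state machine with word tokenization: split each string on ' ', drop empty tokens, and join the tokens' first characters.
import Mathlib
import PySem

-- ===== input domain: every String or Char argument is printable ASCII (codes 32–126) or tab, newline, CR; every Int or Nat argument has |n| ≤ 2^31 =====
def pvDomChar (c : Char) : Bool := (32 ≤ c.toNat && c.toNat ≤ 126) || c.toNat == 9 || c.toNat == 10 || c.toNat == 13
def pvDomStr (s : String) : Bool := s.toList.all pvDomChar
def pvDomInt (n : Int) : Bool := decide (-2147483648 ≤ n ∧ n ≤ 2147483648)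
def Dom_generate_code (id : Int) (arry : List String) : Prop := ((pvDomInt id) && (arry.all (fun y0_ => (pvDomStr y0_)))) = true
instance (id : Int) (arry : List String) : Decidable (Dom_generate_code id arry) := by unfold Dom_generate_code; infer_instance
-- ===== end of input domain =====

-- B replaces A's per-character word-start flag with split-on-space tokenization (objective: simpler).

-- ===== PORT A =====
-- inner loop body of A: the (name, v) state machine over a[i]
def gcStepA (st : List Char × Bool) (c : Char) : List Char × Bool :=
  if c == ' ' then (st.1, true)
  else if c != ' ' && st.2 then (st.1 ++ [c], false)
  else st

def generate_code (id : Int) (arry : List String) : String :=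
  let code : List Char := arry.foldl (fun code a =>
    let nv : List Char × Bool :=
      (PySem.List.pyRange 0 (PySem.Str.len a) 1).foldl
        (fun st i => gcStepA st (PySem.List.pyGetD a.toList i ' ')) ([], true)
    code ++ nv.1) []
  String.ofList (code ++ PySem.Int.toChars id)

-- ===== PORT B =====
def generate_code_alt (id : Int) (arry : List String) : String :=
  String.ofList
    ((arry.flatMap (fun a => (PySem.Chars.splitOn a.toList [' ']).filterMap List.head?))
      ++ PySem.Int.toChars id)

-- ===== PRECONDITION & SPEC =====
def Spec_generate_code (id : Int) (arry : List String) (out : String) : Prop := out = generate_code_alt id arry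
instance (id : Int) (arry : List String) (out : String) : Decidable (Spec_generate_code id arry out) := by unfold Spec_generate_code; infer_instance

-- ===== CLAIM (what is proved, stated in full; the proofs are below) =====
def Claim_equal_generate_code : Prop := ∀ (id : Int) (arry : List String), Dom_generate_code id arry → Spec_generate_code id arry (generate_code id arry)

-- ===== LEMMAS AND PROOFS =====

-- first characters of the space-separated words of cs; v = "at a word start"
def gcFirsts (cs : List Char) (v : Bool) : List Char :=
  match cs with
  | [] => []
  | c :: cs => if c = ' ' then gcFirsts cs true
               else (if v then [c] else []) ++ gcFirsts cs false

theorem gcStepA_foldl (cs : List Char) (acc : List Char) (v : Bool) :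
    (cs.foldl gcStepA (acc, v)).1 = acc ++ gcFirsts cs v := by
  induction cs generalizing acc v with
  | nil => simp [gcFirsts]
  | cons c cs ih =>
    by_cases hc : c = ' '
    · simp [gcStepA, gcFirsts, hc, ih]
    · cases v with
      | true => simp [gcStepA, gcFirsts, hc, ih]
      | false => simp [gcStepA, gcFirsts, hc, ih]

theorem gc_go_firsts (fuel : Nat) (cs cur : List Char) (acc : List (List Char))
    (h : cs.length < fuel) :
    (PySem.Chars.splitOn.go [' '] fuel cs cur acc).filterMap List.head? =
      acc.reverse.filterMap List.head? ++
        (match cur.reverse with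
         | [] => gcFirsts cs true
         | c :: _ => c :: gcFirsts cs false) := by
  induction fuel generalizing cs cur acc with
  | zero => omega
  | succ fuel ih =>
    cases cs with
    | nil =>
      rw [PySem.Chars.splitOn.go]
      all_goals first
        | omega
        | (cases hcur : cur.reverse with
           | nil => simp [gcFirsts]
           | cons c t => simp [gcFirsts])
    | cons c rest =>
      rw [PySem.Chars.splitOn.go]
      by_cases hc : c = ' '
      · have hpre : List.isPrefixOf [' '] (c :: rest) = true := by
          simp [List.isPrefixOf, hc]
        rw [if_pos hpre]
        have hrest : List.drop ([' '] : List Char).length (c :: rest) = rest := by simp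
        rw [hrest, ih rest [] (cur.reverse :: acc) (by simp at h ⊢; omega)]
        cases hcur : cur.reverse with
        | nil => simp [gcFirsts, hc]
        | cons c0 t => simp [gcFirsts, hc]
      · have hpre : List.isPrefixOf [' '] (c :: rest) = false := by
          simp [List.isPrefixOf]; exact fun hh => hc hh.symm
        rw [if_neg (by simp [hpre]), ih rest (c :: cur) acc (by simp at h ⊢; omega)]
        cases hcur : cur.reverse with
        | nil =>
          have hce : cur = [] := by simpa using congrArg List.reverse hcur
          simp [hce, gcFirsts, hc]
        | cons c0 t =>
          simp [List.reverse_cons, hcur, gcFirsts, hc]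

theorem gc_splitOn_firsts (cs : List Char) :
    (PySem.Chars.splitOn cs [' ']).filterMap List.head? = gcFirsts cs true := by
  have := gc_go_firsts (cs.length + 1) cs [] [] (by omega)
  simpa [PySem.Chars.splitOn] using this

theorem gc_inner (a : String) :
    ((PySem.List.pyRange 0 (PySem.Str.len a) 1).foldl
        (fun st i => gcStepA st (PySem.List.pyGetD a.toList i ' ')) ([], true)).1 =
      (PySem.Chars.splitOn a.toList [' ']).filterMap List.head? := by
  rw [gc_splitOn_firsts]
  have hl : PySem.Str.len a = (a.toList.length : Int) := by simp
  rw [hl, PySem.List.foldl_pyRange_zero_pyGetD' a.toList ' ' gcStepA (([], true) : List Char × Bool)]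
  exact gcStepA_foldl a.toList [] true

theorem gc_outer (arry : List String) (init : List Char) :
    arry.foldl (fun code a =>
        code ++ ((PySem.List.pyRange 0 (PySem.Str.len a) 1).foldl
          (fun st i => gcStepA st (PySem.List.pyGetD a.toList i ' ')) ([], true)).1) init =
      init ++ arry.flatMap (fun a => (PySem.Chars.splitOn a.toList [' ']).filterMap List.head?) := by
  induction arry generalizing init with
  | nil => simp
  | cons a rest ih =>
    simp only [List.foldl_cons, List.flatMap_cons, ih, gc_inner a, List.append_assoc]

-- ===== VERDICT (by name: the statement is the Claim_ definition above) =====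
theorem generate_code_spec : Claim_equal_generate_code := by
  intro id arry _
  show generate_code id arry = generate_code_alt id arry
  simp only [generate_code, generate_code_alt]
  rw [gc_outer arry []]
  simp
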